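-- pv_equiv track=rewrite | github.com/mskaa3/PythonLabs | lab4/main.py | longest_request
-- ===== SOURCE A (Python) =====
-- def longest_request(dictionary):
--
--     maxVal=0
--     lineMaxVal=0
--     globalMaxVal=0
--     ip=0
--     myRequest=""
--
--     for line in dictionary:   #for each key in dictionary
--         for request in dictionary[line]:  #for each request in values of key
--             s = request
--             start = s.find(" \"")+ len(" \"")
--             end = s.find("\" ")
--             substring = s[start:end]
--             maxVal=len(substring)
--             if maxVal>lineMaxVal:
--                 lineMaxVal=maxVal
--                 myRequest=request
--         if lineMaxVal>globalMaxVal: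
--             globalMaxVal=lineMaxVal
--             ip=line
--     return ip +" with a string " + myRequest
-- ===== SOURCE B (Python) =====
-- def _quoted_len(s):
--     start = s.find(' "') + 2
--     end = s.find('" ')
--     return len(s[start:end])
--
--
-- def _line_best(requests):
--     best_len = 0
--     best_req = ""
--     for request in requests:
--         l = _quoted_len(request)
--         if l > best_len:
--             best_len = l
--             best_req = request
--     return best_len, best_req
--
--
-- def longest_request(dictionary):
--     bests = [(key, _line_best(dictionary[key])) for key in dictionary]
--     best = 0
--     ip = ""
--     myRequest = ""
--     for key, (l, req) in bests:
--         if l > best: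
--             best = l
--             ip = key
--             myRequest = req
--     return ip + " with a string " + myRequest
-- ===== Notes on version B (the rewrite author's own statement) =====
-- stated objective: alternative
-- what changed: B splits the work into two phases: phase 1 computes, per key, that line's first max-quoted-length request as a (key, (len, request)) summary; phase 2 scans the summaries once with a single strict running max, replacing A's nested loop whose lineMaxVal/globalMaxVal accumulators leak across lines. Pre_ excludes inputs where no request has a positive extracted length (A raises TypeError on its int-0 ip there) and assoc lists with duplicate keys (no Python dict corresponds to them).
import Mathlib
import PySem

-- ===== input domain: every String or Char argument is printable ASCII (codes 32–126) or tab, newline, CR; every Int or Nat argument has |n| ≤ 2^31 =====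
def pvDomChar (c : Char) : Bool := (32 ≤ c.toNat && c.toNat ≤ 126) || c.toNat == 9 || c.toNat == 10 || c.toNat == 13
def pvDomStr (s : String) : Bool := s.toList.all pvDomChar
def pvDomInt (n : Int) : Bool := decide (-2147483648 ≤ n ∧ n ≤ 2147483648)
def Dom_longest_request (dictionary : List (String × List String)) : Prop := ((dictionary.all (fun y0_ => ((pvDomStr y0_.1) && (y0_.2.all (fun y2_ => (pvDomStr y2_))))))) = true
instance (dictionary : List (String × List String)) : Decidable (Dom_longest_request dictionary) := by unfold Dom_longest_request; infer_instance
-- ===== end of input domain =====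

-- B re-decomposes A's nested loop (with its cross-line accumulators) into per-line summaries plus
-- one scan; equivalence of the return values is proved on Pre_ (A raises TypeError outside it).

-- ===== PORT A =====
-- A's nested loop, transliterated with the state (lineMaxVal, globalMaxVal, ip, myRequest);
-- maxVal is the per-iteration temporary.  Python's ip starts as the int 0 and A raises TypeError
-- if it is never overwritten; Pre_ admits only inputs where it is overwritten, so the initial ip
-- is represented by "" here.  len(" \"") = 2.
def longest_request (dictionary : List (String × List String)) : String :=
  let st := dictionary.foldl
    (fun (acc : Nat × Nat × String × String) kv =>
      let inner := ((PySem.Dict.mk dictionary).getD kv.1 []).foldl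
        (fun (a : Nat × String) request =>
          let s := request.toList
          let start := PySem.Chars.find s " \"".toList + 2
          let stop := PySem.Chars.find s "\" ".toList
          let substring := PySem.List.slice s (some start) (some stop)
          let maxVal := substring.length
          if maxVal > a.1 then (maxVal, request) else a)
        (acc.1, acc.2.2.2)
      if inner.1 > acc.2.1 then (inner.1, inner.1, kv.1, inner.2)
      else (inner.1, acc.2.1, acc.2.2.1, inner.2))
    (0, 0, "", "")
  st.2.2.1 ++ " with a string " ++ st.2.2.2

-- ===== PORT B =====
def qlenB (s : String) : Nat :=
  let cs := s.toList
  let start := PySem.Chars.find cs " \"".toList + 2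
  let stop := PySem.Chars.find cs "\" ".toList
  (PySem.List.slice cs (some start) (some stop)).length

def lineBest (requests : List String) : Nat × String :=
  requests.foldl (fun (a : Nat × String) r => if qlenB r > a.1 then (qlenB r, r) else a) (0, "")

def longest_request_alt (dictionary : List (String × List String)) : String :=
  let bests := dictionary.map (fun kv => (kv.1, lineBest kv.2))
  let fin := bests.foldl
    (fun (st : Nat × String × String) e =>
      if e.2.1 > st.1 then (e.2.1, e.1, e.2.2) else st)
    (0, "", "")
  fin.2.1 ++ " with a string " ++ fin.2.2

-- ===== PRECONDITION & SPEC =====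
-- the quoted-substring length A and B extract, restated for the precondition
def qlenP (s : String) : Nat :=
  let cs := s.toList
  (PySem.List.slice cs (some (PySem.Chars.find cs " \"".toList + 2))
      (some (PySem.Chars.find cs "\" ".toList))).length

-- Pre_ excludes (a) inputs where every extracted length is 0, on which Python's ip stays the int 0
-- and A raises TypeError at the final concatenation, and (b) assoc lists with duplicate keys, which
-- no Python dict can represent.
def Pre_longest_request (dictionary : List (String × List String)) : Prop :=
  (dictionary.map Prod.fst).Nodup ∧ ∃ kv ∈ dictionary, ∃ r ∈ kv.2, 0 < qlenP r

instance (dictionary : List (String × List String)) : Decidable (Pre_longest_request dictionary) := by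
  unfold Pre_longest_request; infer_instance

def pvWitness_longest_request : (List (String × List String)) := [("a", ["x \"q\" y"])]

def Spec_longest_request (dictionary : List (String × List String)) (out : String) : Prop := out = longest_request_alt dictionary
instance (dictionary : List (String × List String)) (out : String) : Decidable (Spec_longest_request dictionary out) := by unfold Spec_longest_request; infer_instance

-- ===== CLAIM (what is proved, stated in full; the proofs are below) =====
def Claim_equal_longest_request : Prop := ∀ (dictionary : List (String × List String)), Dom_longest_request dictionary → Pre_longest_request dictionary → Spec_longest_request dictionary (longest_request dictionary)

-- ===== LEMMAS AND PROOFS =====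

-- the shared per-request update (A's inner loop body = B's _line_best body)
def innerStep : Nat × String → String → Nat × String :=
  fun a r => if qlenB r > a.1 then (qlenB r, r) else a

-- A's outer loop body, lookup done in the full dictionary d0
def stepA (d0 : List (String × List String)) :
    Nat × Nat × String × String → String × List String → Nat × Nat × String × String :=
  fun acc kv =>
    let inner := ((PySem.Dict.mk d0).getD kv.1 []).foldl innerStep (acc.1, acc.2.2.2)
    if inner.1 > acc.2.1 then (inner.1, inner.1, kv.1, inner.2)
    else (inner.1, acc.2.1, acc.2.2.1, inner.2)

-- B's phase-2 body
def stepB : Nat × String × String → String × (Nat × String) → Nat × String × String :=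
  fun st e => if e.2.1 > st.1 then (e.2.1, e.1, e.2.2) else st

lemma longest_request_eq (d : List (String × List String)) :
    longest_request d =
      (let st := d.foldl (stepA d) (0, 0, "", ""); st.2.2.1 ++ " with a string " ++ st.2.2.2) := rfl

lemma longest_request_alt_eq (d : List (String × List String)) :
    longest_request_alt d =
      (let t := d.foldl (fun st kv => stepB st (kv.1, lineBest kv.2)) (0, "", "");
       t.2.1 ++ " with a string " ++ t.2.2) := by
  simp only [longest_request_alt, List.foldl_map]
  rfl

lemma lineBest_eq (rs : List String) : lineBest rs = rs.foldl innerStep (0, "") := rfl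

lemma inner_mono (rs : List String) : ∀ (m : Nat) (x : String), m ≤ (rs.foldl innerStep (m, x)).1 := by
  induction rs with
  | nil => intro m x; simp
  | cons r rs ih =>
    intro m x
    simp only [List.foldl_cons, innerStep]
    by_cases h : qlenB r > m
    · simp only [if_pos h]
      exact le_trans (le_of_lt h) (ih (qlenB r) r)
    · simp only [if_neg h]
      exact ih m x

lemma inner_shift (rs : List String) : ∀ (m : Nat) (x : String),
    rs.foldl innerStep (m, x) =
      if (rs.foldl innerStep (0, "")).1 > m then rs.foldl innerStep (0, "") else (m, x) := by
  induction rs with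
  | nil => intro m x; simp
  | cons r rs ih =>
    intro m x
    simp only [List.foldl_cons, innerStep]
    by_cases hqm : qlenB r > m
    · have hq0 : qlenB r > 0 := Nat.lt_of_le_of_lt (Nat.zero_le m) hqm
      simp only [if_pos hqm, if_pos hq0]
      rw [if_pos]
      exact lt_of_lt_of_le hqm (inner_mono rs (qlenB r) r)
    · by_cases hq0 : qlenB r > 0
      · simp only [if_neg hqm, if_pos hq0]
        rw [ih m x, ih (qlenB r) r]
        split_ifs <;> first | rfl | omega
      · simp only [if_neg hqm, if_neg hq0]
        exact ih m x

lemma getD_mk_of_mem (d : List (String × List String))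
    (h : (d.map Prod.fst).Nodup) :
    ∀ kv ∈ d, (PySem.Dict.mk d).getD kv.1 [] = kv.2 := by
  induction d with
  | nil => intro kv hkv; cases hkv
  | cons hd tl ih =>
    obtain ⟨k, v⟩ := hd
    intro kv hkv
    simp only [List.map_cons, List.nodup_cons] at h
    cases hkv with
    | head => simp [PySem.Dict.getD, PySem.Dict.get?_mk_cons]
    | tail _ hkv =>
      have hne : k ≠ kv.1 := by
        intro he
        exact h.1 (he ▸ List.mem_map_of_mem hkv)
      have hih := ih h.2 kv hkv
      simp only [PySem.Dict.getD, PySem.Dict.get?_mk_cons] at hih ⊢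
      simp [hne, hih]

lemma outer (d0 d : List (String × List String))
    (hsub : ∀ kv ∈ d, (PySem.Dict.mk d0).getD kv.1 [] = kv.2) :
    ∀ (m : Nat) (ip req : String),
      d.foldl (stepA d0) (m, m, ip, req) =
        (let t := d.foldl (fun st kv => stepB st (kv.1, lineBest kv.2)) (m, ip, req);
         (t.1, t.1, t.2.1, t.2.2)) := by
  induction d with
  | nil => intro m ip req; rfl
  | cons kv d ih =>
    intro m ip req
    have hkv : (PySem.Dict.mk d0).getD kv.1 [] = kv.2 := hsub kv (List.mem_cons_self)
    have hsub' : ∀ kv' ∈ d, (PySem.Dict.mk d0).getD kv'.1 [] = kv'.2 :=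
      fun kv' h' => hsub kv' (List.mem_cons_of_mem _ h')
    simp only [List.foldl_cons]
    have hstep : stepA d0 (m, m, ip, req) kv =
        (let L := lineBest kv.2;
         if L.1 > m then (L.1, L.1, kv.1, L.2) else (m, m, ip, req)) := by
      simp only [stepA, hkv]
      rw [show kv.2.foldl innerStep ((m, m, ip, req).1, (m, m, ip, req).2.2.2)
            = kv.2.foldl innerStep (m, req) from rfl,
          inner_shift kv.2 m req, ← lineBest_eq]
      by_cases h : (lineBest kv.2).1 > m
      · simp [h]
      · simp [h]
    rw [hstep]
    by_cases h : (lineBest kv.2).1 > m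
    · simp only [if_pos h]
      rw [ih hsub' (lineBest kv.2).1 kv.1 (lineBest kv.2).2]
      simp [stepB, h]
    · simp only [if_neg h]
      rw [ih hsub' m ip req]
      simp [stepB, h]

-- ===== VERDICT (by name: the statement is the Claim_ definition above) =====
theorem longest_request_spec : Claim_equal_longest_request := by
  intro d _hdom hpre
  unfold Spec_longest_request
  rw [longest_request_eq, longest_request_alt_eq]
  have := outer d d (fun kv hkv => getD_mk_of_mem d hpre.1 kv hkv) 0 "" ""
  simp only at this ⊢
  rw [this]
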